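-- pv_equiv track=rewrite | github.com/flishwang/autosend | autosend/autosend.py | simulate_terminal_output
-- ===== SOURCE A (Python) =====
-- def simulate_terminal_output(output_str):
--     width = 140
--     current_pos = 0
--     lines = []
--     current_line = ""
--
--     # Iterate through each character in the input string
--     for char in output_str:
--         # Handle control characters
--         if char == '\b':
--             if current_pos > 0:
--                 current_pos -= 1
--                 current_line = current_line[:-1]
--         elif char == '\r':
--             current_pos = 0
--             current_line = ""
--         elif char == '\n':
--             lines.append(current_line)
--             current_line = ""
--             current_pos = 0
--         else:
--             # Append printable characters to current line
--             if current_pos >= width: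
--                 lines.append(current_line)
--                 current_line = ""
--                 current_pos = 0
--             current_line += char
--             current_pos += 1
--     lines.append(current_line)
--     return lines
-- ===== SOURCE B (Python) =====
-- def simulate_terminal_output(output_str):
--     results = []
--     for segment in output_str.split('\n'):
--         line = ""
--         for ch in segment:
--             if ch == '\b':
--                 line = line[:-1]
--             elif ch == '\r':
--                 line = ""
--             else:
--                 if len(line) >= 140:
--                     results.append(line)
--                     line = ""
--                 line += ch
--         results.append(line)
--     return results
-- ===== Notes on version B (the rewrite author's own statement) =====
-- stated objective: simpler
-- what changed: B pre-splits the input into newline-separated segments and processes each with only a line buffer, eliminating A's redundant position counter (which always equals the line length) and its inline newline branch.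
import Mathlib
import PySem

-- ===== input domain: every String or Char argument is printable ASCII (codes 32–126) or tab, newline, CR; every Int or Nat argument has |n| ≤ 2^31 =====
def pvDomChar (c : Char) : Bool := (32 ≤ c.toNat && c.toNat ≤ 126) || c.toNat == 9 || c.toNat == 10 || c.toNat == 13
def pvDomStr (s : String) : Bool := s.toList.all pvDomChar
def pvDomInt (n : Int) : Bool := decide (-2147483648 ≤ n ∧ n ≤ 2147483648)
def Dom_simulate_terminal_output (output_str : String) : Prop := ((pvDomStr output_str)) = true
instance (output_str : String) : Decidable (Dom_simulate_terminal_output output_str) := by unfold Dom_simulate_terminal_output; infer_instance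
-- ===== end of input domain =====

-- B splits on '\n' first and drops A's redundant position counter (it always equals the
-- current line's length); same return value, simpler decomposition (objective: simpler).

-- ===== PORT A =====
-- loop body of A: state is (lines, current_line as List Char, current_pos)
def pvStepA (st : List String × List Char × Int) (c : Char) : List String × List Char × Int :=
  if c = '\x08' then
    if st.2.2 > 0 then (st.1, st.2.1.dropLast, st.2.2 - 1) else st
  else if c = '\r' then (st.1, [], 0)
  else if c = '\n' then (st.1 ++ [String.ofList st.2.1], [], 0)
  else if st.2.2 ≥ 140 then (st.1 ++ [String.ofList st.2.1], [c], 1)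
  else (st.1, st.2.1 ++ [c], st.2.2 + 1)

def simulate_terminal_output (output_str : String) : List String :=
  let st := output_str.toList.foldl pvStepA ([], [], 0)
  st.1 ++ [String.ofList st.2.1]

-- ===== PORT B =====
-- inner loop body of B: state is (results, line as List Char); line[:-1] is dropLast
def pvStepB (st : List String × List Char) (ch : Char) : List String × List Char :=
  if ch = '\x08' then (st.1, st.2.dropLast)
  else if ch = '\r' then (st.1, [])
  else if st.2.length ≥ 140 then (st.1 ++ [String.ofList st.2], [ch])
  else (st.1, st.2 ++ [ch])

-- outer loop body of B: run one segment from an empty line, then append the final line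
def pvOuterB (results : List String) (seg : List Char) : List String :=
  let st := seg.foldl pvStepB (results, [])
  st.1 ++ [String.ofList st.2]

def simulate_terminal_output_alt (output_str : String) : List String :=
  (PySem.Chars.splitOn output_str.toList "\n".toList).foldl pvOuterB []

-- ===== PRECONDITION & SPEC =====
def Spec_simulate_terminal_output (output_str : String) (out : List String) : Prop := out = simulate_terminal_output_alt output_str
instance (output_str : String) (out : List String) : Decidable (Spec_simulate_terminal_output output_str out) := by unfold Spec_simulate_terminal_output; infer_instance

-- ===== CLAIM (what is proved, stated in full; the proofs are below) =====
def Claim_equal_simulate_terminal_output : Prop := ∀ (output_str : String), Dom_simulate_terminal_output output_str → Spec_simulate_terminal_output output_str (simulate_terminal_output output_str)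

-- ===== LEMMAS AND PROOFS =====

-- reference form of splitting a char list on '\n'
def splitNL : List Char → List (List Char)
  | [] => [[]]
  | c :: rest => if c = '\n' then [] :: splitNL rest else (splitNL rest).modifyHead (c :: ·)

lemma splitNL_ne_nil (cs : List Char) : splitNL cs ≠ [] := by
  induction cs with
  | nil => simp [splitNL]
  | cons c rest ih =>
    simp only [splitNL]
    split_ifs
    · simp
    · cases h : splitNL rest with
      | nil => exact absurd h ih
      | cons a t => simp [List.modifyHead]

lemma go_spec : ∀ (fuel : Nat) (l cur : List Char) (acc : List (List Char)), l.length ≤ fuel →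
    PySem.Chars.splitOn.go ['\n'] fuel l cur acc
      = acc.reverse ++ (splitNL l).modifyHead (cur.reverse ++ ·) := by
  intro fuel
  induction fuel with
  | zero =>
    intro l cur acc h
    have : l = [] := by cases l <;> simp_all
    subst this
    simp [PySem.Chars.splitOn.go, splitNL]
  | succ n ih =>
    intro l cur acc h
    cases l with
    | nil => simp [PySem.Chars.splitOn.go, splitNL]
    | cons c rest =>
      rw [PySem.Chars.splitOn.go]
      by_cases hc : c = '\n'
      · subst hc
        simp only [List.isPrefixOf, BEq.rfl, Bool.and_self, if_pos, List.length_cons,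
          List.length_nil, List.drop_succ_cons, List.drop_zero]
        rw [ih rest [] _ (by simpa using Nat.le_of_succ_le_succ h)]
        cases hs : splitNL rest with
        | nil => exact absurd hs (splitNL_ne_nil rest)
        | cons a t => simp [splitNL, hs, List.modifyHead]
      · have : (['\n'].isPrefixOf (c :: rest)) = false := by
          simp [List.isPrefixOf]; exact fun hh => absurd hh.symm hc
        rw [this]
        simp only [Bool.false_eq_true, if_neg, not_false_iff]
        rw [ih rest (c :: cur) _ (by simpa using Nat.le_of_succ_le_succ h)]
        cases hs : splitNL rest with
        | nil => exact absurd hs (splitNL_ne_nil rest)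
        | cons a t => simp [splitNL, hc, hs, List.modifyHead]

lemma splitOn_eq_splitNL (cs : List Char) : PySem.Chars.splitOn cs ['\n'] = splitNL cs := by
  rw [PySem.Chars.splitOn, go_spec (cs.length + 1) cs [] [] (by omega)]
  cases hs : splitNL cs with
  | nil => exact absurd hs (splitNL_ne_nil cs)
  | cons a t => simp [List.modifyHead]

-- B's computation, phrased on the segment list with an explicit carried (results, line) state
def runB : List (List Char) → List String × List Char → List String
  | [], st => st.1
  | seg :: rest, st =>
    let st' := seg.foldl pvStepB st
    match rest with
    | [] => st'.1 ++ [String.ofList st'.2]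
    | _ :: _ => runB rest (st'.1 ++ [String.ofList st'.2], [])

lemma runB_cons_head (seg : List Char) (rest : List (List Char)) (st : List String × List Char)
    (c : Char) : runB ((c :: seg) :: rest) st = runB (seg :: rest) (pvStepB st c) := rfl

lemma foldOuter_eq_runB : ∀ (segs : List (List Char)), segs ≠ [] → ∀ (results : List String),
    segs.foldl pvOuterB results = runB segs (results, []) := by
  intro segs
  induction segs with
  | nil => intro h; exact absurd rfl h
  | cons seg rest ih =>
    intro _ results
    cases rest with
    | nil => simp [runB, pvOuterB]
    | cons s t =>
      rw [List.foldl_cons, ih (by simp)]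
      rfl

-- A's step preserves the invariant pos = line.length and matches B's step (for c ≠ '\n')
lemma step_compat (lines : List String) (line : List Char) (c : Char) (hc : c ≠ '\n') :
    pvStepA (lines, line, (line.length : Int)) c
      = ((pvStepB (lines, line) c).1, (pvStepB (lines, line) c).2,
          ((pvStepB (lines, line) c).2.length : Int)) := by
  simp only [pvStepA, pvStepB]
  by_cases hb : c = '\x08'
  · by_cases hl : line = []
    · subst hl; simp [hb]
    · have h1 : 1 ≤ line.length := by
        cases line with
        | nil => exact absurd rfl hl
        | cons a t => simp
      simp only [hb, if_pos]
      rw [if_pos (by exact_mod_cast h1)]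
      simp [List.length_dropLast]
      omega
  · by_cases hr : c = '\r'
    · simp [hr]
    · by_cases hw : line.length ≥ 140
      · simp [hb, hr, hc, hw]
      · simp [hb, hr, hc, hw]

lemma runA_eq : ∀ (cs : List Char) (lines : List String) (line : List Char),
    (cs.foldl pvStepA (lines, line, (line.length : Int))).1
        ++ [String.ofList (cs.foldl pvStepA (lines, line, (line.length : Int))).2.1]
      = runB (splitNL cs) (lines, line) := by
  intro cs
  induction cs with
  | nil =>
    intro lines line
    simp [splitNL, runB]
  | cons c rest ih =>
    intro lines line
    obtain ⟨seg, t, hs⟩ : ∃ seg t, splitNL rest = seg :: t := by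
      cases h : splitNL rest with
      | nil => exact absurd h (splitNL_ne_nil rest)
      | cons a b => exact ⟨a, b, rfl⟩
    by_cases hc : c = '\n'
    · subst hc
      have hA : pvStepA (lines, line, (line.length : Int)) '\n'
          = (lines ++ [String.ofList line], [], 0) := by simp [pvStepA]
      rw [List.foldl_cons, hA]
      have := ih (lines ++ [String.ofList line]) []
      simp only [List.length_nil, Int.natCast_zero] at this
      rw [this]
      have hsp : splitNL ('\n' :: rest) = [] :: seg :: t := by simp [splitNL, hs]
      rw [hsp, hs]
      rfl
    · have hsp : splitNL (c :: rest) = (c :: seg) :: t := by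
        simp [splitNL, hc, hs, List.modifyHead]
      rw [hsp, runB_cons_head, List.foldl_cons, step_compat lines line c hc]
      rw [ih (pvStepB (lines, line) c).1 (pvStepB (lines, line) c).2]
      rw [hs]

-- ===== VERDICT (by name: the statement is the Claim_ definition above) =====
theorem simulate_terminal_output_spec : Claim_equal_simulate_terminal_output := by
  intro output_str _
  unfold Spec_simulate_terminal_output simulate_terminal_output simulate_terminal_output_alt
  have hnl : "\n".toList = ['\n'] := rfl
  rw [hnl, splitOn_eq_splitNL,
    foldOuter_eq_runB (splitNL output_str.toList) (splitNL_ne_nil _) []]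
  have := runA_eq output_str.toList [] []
  simpa using this
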